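-- pv_equiv track=rewrite | github.com/wherby/code | contest/00000c275d69/d82/q3/t3.py | arrayChangeWithK
-- ===== SOURCE A (Python) =====
-- def arrayChangeWithK(ls,k):
--     left,right = 0,10**11
--     count =0
--     while left < right:
--         mid = (left+right)>>1
--         sm = 0
--         for a in ls:
--             sm += max(0, a -mid )
--         if sm >k:
--             left = mid +1
--         else:
--             right = mid
--             count = k - sm
--     ret= []
--     if left ==0:
--         return [0]*len(ls)
--     for a in ls:
--         if a < left:
--             ret.append(a)
--         else:
--             ret.append(left -min(1,max(0,count)))
--             count -=1
--     return ret
-- ===== SOURCE B (Python) =====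
-- def arrayChangeWithK(ls, k):
--     # Closed-form threshold via sort + running prefix maximum instead of binary search.
--     if k < 0:
--         # no budget at all: nothing can be reduced
--         return list(ls)
--     s = sorted(ls, reverse=True)
--     T = 0
--     P = 0
--     m = 0
--     for v in s:
--         m += 1
--         P += v
--         # smallest integer t with (P - m*t) <= k is ceil((P-k)/m) = -((k-P)//m)
--         T = max(T, -((k - P) // m))
--     if T == 0:
--         return [0] * len(ls)
--     cost = 0
--     for a in ls:
--         cost += max(0, a - T)
--     count = k - cost
--     res = []
--     for a in ls:
--         if a < T:
--             res.append(a)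
--         else:
--             res.append(T - 1 if count > 0 else T)
--             count -= 1
--     return res
-- ===== Notes on version B (the rewrite author's own statement) =====
-- stated objective: faster
-- what changed: Replaces A's ~37-iteration binary search over [0,10^11] (each iteration rescanning the whole list) by sorting the list descending and computing the optimal threshold directly as a running prefix-sum maximum of ceil((P_j-k)/j), then the same reduce/output pass.
import Mathlib
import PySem

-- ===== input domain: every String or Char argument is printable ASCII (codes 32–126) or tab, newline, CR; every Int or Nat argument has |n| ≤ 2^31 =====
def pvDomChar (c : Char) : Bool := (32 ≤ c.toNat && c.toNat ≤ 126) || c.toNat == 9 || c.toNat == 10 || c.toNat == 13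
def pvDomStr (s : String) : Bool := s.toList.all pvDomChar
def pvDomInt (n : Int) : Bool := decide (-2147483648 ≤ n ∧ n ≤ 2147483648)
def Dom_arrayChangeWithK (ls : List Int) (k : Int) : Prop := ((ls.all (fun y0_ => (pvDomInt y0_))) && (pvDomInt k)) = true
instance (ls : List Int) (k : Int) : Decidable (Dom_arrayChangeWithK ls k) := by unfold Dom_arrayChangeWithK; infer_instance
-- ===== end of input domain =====

-- B replaces A's binary search over [0,10^11] by a sort + running prefix-maximum
-- closed form for the threshold (alternative algorithm, same return value on Dom).

-- ===== PORT A =====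
-- the inner `for a in ls: sm += max(0, a-mid)` loop of A, as a fold
def pvCost (ls : List Int) (t : Int) : Int :=
  ls.foldl (fun sm a => sm + max 0 (a - t)) 0

-- A's while-loop binary search; `(left+right)>>1` is floor division by 2
def pvBS (ls : List Int) (k : Int) (left right count : Int) : Int × Int :=
  if h : left < right then
    let mid := PySem.Int.floordiv (left + right) 2
    let sm := pvCost ls mid
    if sm > k then pvBS ls k (mid + 1) right count
    else pvBS ls k left mid (k - sm)
  else (left, count)
termination_by (right - left).toNat
decreasing_by
  · have h1 : left ≤ PySem.Int.floordiv (left + right) 2 := by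
      rw [PySem.Int.le_floordiv_iff_mul_le (by omega : (0:Int) < 2)]; omega
    omega
  · have h2 : PySem.Int.floordiv (left + right) 2 < right := by
      rw [PySem.Int.floordiv_lt_iff_lt_mul (by omega : (0:Int) < 2)]; omega
    have h1 : left ≤ PySem.Int.floordiv (left + right) 2 := by
      rw [PySem.Int.le_floordiv_iff_mul_le (by omega : (0:Int) < 2)]; omega
    omega

-- A's output loop (ret built by append = structural recursion threading `count`)
def pvOutA (left : Int) : List Int → Int → List Int
  | [], _ => []
  | a :: rest, count =>
    if a < left then a :: pvOutA left rest count
    else (left - min 1 (max 0 count)) :: pvOutA left rest (count - 1)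

def arrayChangeWithK (ls : List Int) (k : Int) : List Int :=
  let r := pvBS ls k 0 100000000000 0
  if r.1 = 0 then List.replicate ls.length 0
  else pvOutA r.1 ls r.2

-- ===== PORT B =====
-- ceil((P-k)/m) written as Python's -((k-P)//m)
def pvCeil (k P m : Int) : Int := -(PySem.Int.floordiv (k - P) m)

-- one step of B's loop over the descending-sorted list; state (T, P, m)
def pvStep (k : Int) (st : Int × Int × Int) (v : Int) : Int × Int × Int :=
  (max st.1 (pvCeil k (st.2.1 + v) (st.2.2 + 1)), st.2.1 + v, st.2.2 + 1)

-- B's output loop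
def pvOutB (T : Int) : List Int → Int → List Int
  | [], _ => []
  | a :: rest, count =>
    if a < T then a :: pvOutB T rest count
    else (if count > 0 then T - 1 else T) :: pvOutB T rest (count - 1)

def arrayChangeWithK_alt (ls : List Int) (k : Int) : List Int :=
  if k < 0 then ls
  else
    let s := PySem.List.sorted ls (fun x => x) true
    let T := (s.foldl (pvStep k) (0, 0, 0)).1
    if T = 0 then List.replicate ls.length 0
    else
      let cost := ls.foldl (fun c a => c + max 0 (a - T)) 0
      pvOutB T ls (k - cost)

-- ===== PRECONDITION & SPEC =====
def Spec_arrayChangeWithK (ls : List Int) (k : Int) (out : List Int) : Prop := out = arrayChangeWithK_alt ls k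
instance (ls : List Int) (k : Int) (out : List Int) : Decidable (Spec_arrayChangeWithK ls k out) := by unfold Spec_arrayChangeWithK; infer_instance

-- ===== CLAIM (what is proved, stated in full; the proofs are below) =====
def Claim_equal_arrayChangeWithK : Prop := ∀ (ls : List Int) (k : Int), Dom_arrayChangeWithK ls k → Spec_arrayChangeWithK ls k (arrayChangeWithK ls k)

-- ===== LEMMAS AND PROOFS =====

theorem pvCost_eq_sum (ls : List Int) (t : Int) :
    pvCost ls t = (ls.map (fun a => max 0 (a - t))).sum := by
  have h : ∀ (xs : List Int) (c : Int),
      xs.foldl (fun sm a => sm + max 0 (a - t)) c = c + (xs.map (fun a => max 0 (a - t))).sum := by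
    intro xs
    induction xs with
    | nil => simp
    | cons a xs ih => intro c; simp [ih, add_assoc]
  simpa [pvCost] using h ls 0

theorem pvCost_nonneg (ls : List Int) (t : Int) : 0 ≤ pvCost ls t := by
  rw [pvCost_eq_sum]
  induction ls with
  | nil => simp
  | cons a xs ih => simp only [List.map_cons, List.sum_cons]; have := le_max_left 0 (a - t); omega

theorem pvCost_perm {xs ys : List Int} (h : xs.Perm ys) (t : Int) :
    pvCost xs t = pvCost ys t := by
  rw [pvCost_eq_sum, pvCost_eq_sum]
  exact (h.map _).sum_eq

theorem pvCost_anti (ls : List Int) {u v : Int} (h : u ≤ v) :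
    pvCost ls v ≤ pvCost ls u := by
  rw [pvCost_eq_sum, pvCost_eq_sum]
  induction ls with
  | nil => simp
  | cons a xs ih => simp only [List.map_cons, List.sum_cons]; have : max 0 (a - v) ≤ max 0 (a - u) := by omega
                    omega

theorem pvCost_zero_of_all_le (ls : List Int) (t : Int) (h : ∀ a ∈ ls, a ≤ t) :
    pvCost ls t = 0 := by
  rw [pvCost_eq_sum]
  induction ls with
  | nil => simp
  | cons a xs ih =>
      simp only [List.map_cons, List.sum_cons]
      have ha := h a (by simp)
      have h0 : max 0 (a - t) = 0 := by omega
      rw [h0, ih (fun b hb => h b (by simp [hb]))]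
      ring

theorem pvCost_ge_prefix (ls : List Int) (t : Int) (m : Nat) (hm : m ≤ ls.length) :
    (ls.take m).sum - (m : Int) * t ≤ pvCost ls t := by
  have hsplit : pvCost ls t = pvCost (ls.take m) t + pvCost (ls.drop m) t := by
    rw [pvCost_eq_sum, pvCost_eq_sum, pvCost_eq_sum, ← List.sum_append, ← List.map_append,
      List.take_append_drop]
  have h1 : (ls.take m).sum - ((ls.take m).length : Int) * t ≤ pvCost (ls.take m) t := by
    generalize ls.take m = xs
    rw [pvCost_eq_sum]
    induction xs with
    | nil => simp
    | cons a xs ih =>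
        simp only [List.map_cons, List.sum_cons, List.length_cons]
        push_cast
        have : a - t ≤ max 0 (a - t) := le_max_right _ _
        nlinarith [ih]
  have hlen : (ls.take m).length = m := by simp [List.length_take, Nat.min_eq_left hm]
  have h2 := pvCost_nonneg (ls.drop m) t
  rw [hlen] at h1
  omega

theorem pvCost_band (s : List Int) (t : Int) (hs : s.Pairwise (fun a b => b ≤ a)) :
    ∃ m : Nat, m ≤ s.length ∧ pvCost s t = (s.take m).sum - (m : Int) * t := by
  induction s with
  | nil => exact ⟨0, by simp, by simp [pvCost]⟩
  | cons a xs ih =>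
      rcases List.pairwise_cons.mp hs with ⟨hhead, htail⟩
      by_cases hat : a ≤ t
      · refine ⟨0, by simp, ?_⟩
        rw [pvCost_zero_of_all_le _ t ?_]
        · simp
        · intro b hb
          rcases List.mem_cons.mp hb with rfl | hb
          · exact hat
          · exact le_trans (hhead b hb) hat
      · rcases ih htail with ⟨m, hm, hcost⟩
        refine ⟨m + 1, by simpa using Nat.succ_le_succ hm, ?_⟩
        have hcons : pvCost (a :: xs) t = max 0 (a - t) + pvCost xs t := by
          simp [pvCost_eq_sum]
        have hmax : max 0 (a - t) = a - t := by omega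
        rw [hcons, hmax, hcost]
        simp only [List.take_succ_cons, List.sum_cons]
        push_cast
        ring

theorem pvCeil_le_iff (k P m t : Int) (hm : 0 < m) :
    pvCeil k P m ≤ t ↔ P - m * t ≤ k := by
  have h := (PySem.Int.floordiv_eq_iff_of_pos hm (a := k - P)
      (q := PySem.Int.floordiv (k - P) m)).mp rfl
  unfold pvCeil
  constructor
  · intro ht
    nlinarith [h.1]
  · intro ht
    by_contra hlt
    push_neg at hlt
    have : t ≤ -(PySem.Int.floordiv (k - P) m) - 1 := by omega
    nlinarith [h.2]

-- B's fold computes max(0, max_{1≤j≤n} ceil((P_j - k)/j)) over prefix sums P_j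
theorem pvFold_spec (k : Int) (s : List Int) :
    (s.foldl (pvStep k) (0, 0, 0)).2.2 = (s.length : Int) ∧
    (s.foldl (pvStep k) (0, 0, 0)).2.1 = s.sum ∧
    0 ≤ (s.foldl (pvStep k) (0, 0, 0)).1 ∧
    (∀ j : Nat, 1 ≤ j → j ≤ s.length →
      pvCeil k ((s.take j).sum) (j : Int) ≤ (s.foldl (pvStep k) (0, 0, 0)).1) ∧
    ((s.foldl (pvStep k) (0, 0, 0)).1 = 0 ∨
      ∃ j : Nat, 1 ≤ j ∧ j ≤ s.length ∧
        (s.foldl (pvStep k) (0, 0, 0)).1 = pvCeil k ((s.take j).sum) (j : Int)) := by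
  induction s using List.reverseRecOn with
  | nil =>
      refine ⟨by simp, by simp, by simp, ?_, by simp⟩
      intro j hj1 hj2
      simp at hj2
      omega
  | append_singleton s v ih =>
      rcases ih with ⟨hm, hP, hT, hbnd, hatt⟩
      rw [List.foldl_append] at *
      simp only [List.foldl_cons, List.foldl_nil]
      set st := s.foldl (pvStep k) (0, 0, 0) with hst
      have hnewP : st.2.1 + v = (s ++ [v]).sum := by simp [hP]
      have hnewm : st.2.2 + 1 = ((s ++ [v]).length : Int) := by
        rw [hm]; simp
      have htake_le : ∀ j : Nat, j ≤ s.length → (s ++ [v]).take j = s.take j := by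
        intro j hj
        rw [List.take_append_of_le_length hj]
      have htake_full : (s ++ [v]).take (s.length + 1) = s ++ [v] := by
        have hl : (s ++ [v]).length = s.length + 1 := by simp
        rw [← hl, List.take_length]
      have hceq : pvCeil k ((s ++ [v]).sum) ((s.length + 1 : Nat) : Int)
          = pvCeil k (st.2.1 + v) (st.2.2 + 1) := by
        rw [hnewP, hnewm]
        congr 1
        simp
      refine ⟨?_, ?_, ?_, ?_, ?_⟩
      · simp [pvStep, hnewm]
      · simp [pvStep, hnewP]
      · simp only [pvStep]
        exact le_trans hT (le_max_left _ _)
      · intro j hj1 hj2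
        simp only [List.length_append, List.length_cons, List.length_nil] at hj2
        by_cases hj : j ≤ s.length
        · rw [htake_le j hj]
          simp only [pvStep]
          exact le_trans (hbnd j hj1 hj) (le_max_left _ _)
        · have hj' : j = s.length + 1 := by omega
          subst hj'
          rw [htake_full]
          simp only [pvStep]
          rw [hceq]
          exact le_max_right _ _
      · simp only [pvStep]
        rcases le_total st.1 (pvCeil k (st.2.1 + v) (st.2.2 + 1)) with hc | hc
        · right
          refine ⟨s.length + 1, by omega, by simp, ?_⟩
          rw [max_eq_right hc, htake_full, hceq]
        · rw [max_eq_left hc]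
          rcases hatt with h0 | ⟨j, hj1, hj2, hjeq⟩
          · exact Or.inl h0
          · exact Or.inr ⟨j, hj1, by simpa using Nat.le_succ_of_le hj2,
              by rw [htake_le j hj2]; exact hjeq⟩

-- B's threshold is the least t ≥ 0 with cost(t) ≤ k (for k ≥ 0)
theorem pvB_least (ls : List Int) (k : Int) (hk : 0 ≤ k) :
    0 ≤ ((PySem.List.sorted ls (fun x => x) true).foldl (pvStep k) (0, 0, 0)).1 ∧
    pvCost ls ((PySem.List.sorted ls (fun x => x) true).foldl (pvStep k) (0, 0, 0)).1 ≤ k ∧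
    (∀ u, 0 ≤ u → u < ((PySem.List.sorted ls (fun x => x) true).foldl (pvStep k) (0, 0, 0)).1 →
      k < pvCost ls u) := by
  set s := PySem.List.sorted ls (fun x => x) true with hs
  have hperm : s.Perm ls := PySem.List.sorted_perm ls (fun x => x) true
  have hpair : s.Pairwise (fun a b => b ≤ a) := by
    have := PySem.List.sorted_pairwise_rev ls (fun x => x)
    simpa using this
  rcases pvFold_spec k s with ⟨_, _, hT0, hbnd, hatt⟩
  refine ⟨hT0, ?_, ?_⟩
  · rw [← pvCost_perm hperm]
    rcases pvCost_band s ((s.foldl (pvStep k) (0, 0, 0)).1) hpair with ⟨m, hm, hcost⟩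
    rcases Nat.eq_zero_or_pos m with rfl | hmpos
    · simpa [hcost] using hk
    · have hb := hbnd m hmpos hm
      have := (pvCeil_le_iff k ((s.take m).sum) (m : Int) _ (by exact_mod_cast hmpos)).mp hb
      omega
  · intro u hu huT
    rw [← pvCost_perm hperm]
    rcases hatt with h0 | ⟨j, hj1, hj2, hjeq⟩
    · omega
    · have hnot : ¬ pvCeil k ((s.take j).sum) (j : Int) ≤ u := by omega
      rw [pvCeil_le_iff _ _ _ _ (by exact_mod_cast hj1)] at hnot
      push_neg at hnot
      have := pvCost_ge_prefix s u j hj2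
      omega

-- A's binary search: invariant ⇒ final (left, count) characterisation
theorem pvBS_spec (ls : List Int) (k : Int) :
    ∀ left right count, 0 ≤ left → left ≤ right →
    (∀ u, 0 ≤ u → u < left → k < pvCost ls u) →
    ((pvCost ls right ≤ k ∧ count = k - pvCost ls right) ∨ (right = 100000000000 ∧ count = 0)) →
    0 ≤ (pvBS ls k left right count).1 ∧
    (∀ u, 0 ≤ u → u < (pvBS ls k left right count).1 → k < pvCost ls u) ∧
    ((pvCost ls (pvBS ls k left right count).1 ≤ k ∧
        (pvBS ls k left right count).2 = k - pvCost ls (pvBS ls k left right count).1) ∨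
      ((pvBS ls k left right count).1 = 100000000000 ∧ (pvBS ls k left right count).2 = 0)) := by
  intro left right count
  induction left, right, count using pvBS.induct ls k with
  | case1 left right count h mid sm hgt ih =>
      intro h0 hlr hmin hdis
      have hm1 : left ≤ mid := by
        show left ≤ PySem.Int.floordiv (left + right) 2
        rw [PySem.Int.le_floordiv_iff_mul_le (by omega : (0:Int) < 2)]; omega
      have hm2 : mid < right := by
        show PySem.Int.floordiv (left + right) 2 < right
        rw [PySem.Int.floordiv_lt_iff_lt_mul (by omega : (0:Int) < 2)]; omega
      have hgt' : k < pvCost ls mid := hgt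
      have heq : pvBS ls k left right count = pvBS ls k (mid + 1) right count := by
        rw [pvBS, dif_pos h]; exact if_pos hgt
      rw [heq]
      refine ih (by omega) (by omega) ?_ hdis
      intro u hu hlt
      by_cases hul : u < left
      · exact hmin u hu hul
      · exact lt_of_lt_of_le hgt' (pvCost_anti ls (by omega))
  | case2 left right count h mid sm hle ih =>
      intro h0 hlr hmin hdis
      have hm1 : left ≤ mid := by
        show left ≤ PySem.Int.floordiv (left + right) 2
        rw [PySem.Int.le_floordiv_iff_mul_le (by omega : (0:Int) < 2)]; omega
      have hle' : pvCost ls mid ≤ k := not_lt.mp hle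
      have heq : pvBS ls k left right count = pvBS ls k left mid (k - sm) := by
        rw [pvBS, dif_pos h]; exact if_neg hle
      rw [heq]
      exact ih h0 hm1 hmin (Or.inl ⟨hle', rfl⟩)
  | case3 left right count h =>
      intro h0 hlr hmin hdis
      have he : left = right := le_antisymm hlr (not_lt.mp h)
      subst he
      have heq : pvBS ls k left left count = (left, count) := by
        rw [pvBS, dif_neg h]
      rw [heq]
      exact ⟨h0, hmin, hdis⟩

theorem pvOutA_id (left : Int) (ls : List Int) (h : ∀ a ∈ ls, a < left) :
    ∀ c, pvOutA left ls c = ls := by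
  induction ls with
  | nil => intro c; simp [pvOutA]
  | cons a xs ih =>
      intro c
      rw [pvOutA, if_pos (h a (by simp))]
      rw [ih (fun b hb => h b (by simp [hb]))]

theorem pvOutAB (T : Int) (ls : List Int) : ∀ c, pvOutA T ls c = pvOutB T ls c := by
  induction ls with
  | nil => intro c; simp [pvOutA, pvOutB]
  | cons a xs ih =>
      intro c
      rw [pvOutA, pvOutB]
      by_cases h : a < T
      · rw [if_pos h, if_pos h, ih]
      · rw [if_neg h, if_neg h, ih]
        congr 1
        split_ifs with hc <;> omega

-- ===== VERDICT (by name: the statement is the Claim_ definition above) =====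
theorem arrayChangeWithK_spec : Claim_equal_arrayChangeWithK := by
  intro ls k hdom
  unfold Spec_arrayChangeWithK
  simp only [Dom_arrayChangeWithK, Bool.and_eq_true, List.all_eq_true, pvDomInt,
    decide_eq_true_eq] at hdom
  obtain ⟨hla, hkb⟩ := hdom
  have hla' : ∀ a ∈ ls, a ≤ 2147483648 := fun a ha => (hla a ha).2
  by_cases hkneg : k < 0
  · obtain ⟨hr0, hrmin, hrdis⟩ := pvBS_spec ls k 0 100000000000 0 (by omega) (by omega)
      (fun u hu hlt => absurd hlt (by omega)) (Or.inr ⟨rfl, rfl⟩)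
    have hnn := pvCost_nonneg ls (pvBS ls k 0 100000000000 0).1
    rcases hrdis with ⟨hc, _⟩ | ⟨h1, h2⟩
    · omega
    · unfold arrayChangeWithK arrayChangeWithK_alt
      rw [if_pos hkneg]
      simp only [h1, h2]
      rw [if_neg (by norm_num)]
      exact pvOutA_id _ _ (fun a ha => by have := hla' a ha; omega) 0
  · push_neg at hkneg
    obtain ⟨hT0, hTfeas, hTmin⟩ := pvB_least ls k hkneg
    obtain ⟨hr0, hrmin, hrdis⟩ := pvBS_spec ls k 0 100000000000 0 (by omega) (by omega)
      (fun u hu hlt => absurd hlt (by omega)) (Or.inr ⟨rfl, rfl⟩)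
    have hfeas_small : pvCost ls 2147483649 = 0 :=
      pvCost_zero_of_all_le _ _ (fun a ha => by have := hla' a ha; omega)
    have hdisl : pvCost ls (pvBS ls k 0 100000000000 0).1 ≤ k ∧
        (pvBS ls k 0 100000000000 0).2 = k - pvCost ls (pvBS ls k 0 100000000000 0).1 := by
      rcases hrdis with hcase | ⟨h1, h2⟩
      · exact hcase
      · exfalso
        have := hrmin 2147483649 (by omega) (by rw [h1]; omega)
        omega
    have hrT : (pvBS ls k 0 100000000000 0).1
        = ((PySem.List.sorted ls (fun x => x) true).foldl (pvStep k) (0, 0, 0)).1 := by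
      by_contra hne
      rcases lt_or_gt_of_ne hne with hlt | hgt2
      · have := hTmin _ hr0 hlt; omega
      · have := hrmin _ hT0 hgt2; omega
    have hcost_eq : ls.foldl (fun c a =>
        c + max 0 (a - ((PySem.List.sorted ls (fun x => x) true).foldl (pvStep k) (0, 0, 0)).1)) 0
        = pvCost ls ((PySem.List.sorted ls (fun x => x) true).foldl (pvStep k) (0, 0, 0)).1 := rfl
    unfold arrayChangeWithK arrayChangeWithK_alt
    rw [if_neg (not_lt.mpr hkneg)]
    by_cases hz : ((PySem.List.sorted ls (fun x => x) true).foldl (pvStep k) (0, 0, 0)).1 = 0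
    · simp only [hrT, hz]
      norm_num
    · simp only [hrT, if_neg hz]
      rw [hdisl.2, hrT, hcost_eq]
      exact pvOutAB _ ls _
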